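-- pv_equiv track=rewrite | github.com/tkovack10/dumbroof-web | scripts/backfill_warehouse.py | _infer_photo_tags
-- ===== SOURCE A (Python) =====
-- def _infer_photo_tags(annotation: str) -> dict:
--     """Infer damage_type, material, trade, elevation from annotation text."""
--     tags = {}
--     if not annotation:
--         return tags
--
--     ann_lower = annotation.lower()
--
--     # Damage type
--     if any(w in ann_lower for w in ["chalk", "chalk test", "chalk line"]):
--         tags["damage_type"] = "chalk_test"
--     elif any(w in ann_lower for w in ["hail dent", "hail impact", "hail damage", "indentation"]):
--         tags["damage_type"] = "hail_dent"
--     elif any(w in ann_lower for w in ["crack", "fracture", "split"]):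
--         tags["damage_type"] = "crack"
--     elif any(w in ann_lower for w in ["missing", "absent", "torn off", "blown off"]):
--         tags["damage_type"] = "missing"
--     elif any(w in ann_lower for w in ["granule loss", "granule displacement"]):
--         tags["damage_type"] = "granule_loss"
--     elif any(w in ann_lower for w in ["lifted", "curled", "unsealed"]):
--         tags["damage_type"] = "lifted_tab"
--     elif any(w in ann_lower for w in ["wind crease", "wind damage"]):
--         tags["damage_type"] = "wind_crease"
--     elif any(w in ann_lower for w in ["rust", "corrosion", "oxidation"]):
--         tags["damage_type"] = "corrosion"
--     elif any(w in ann_lower for w in ["overview", "aerial", "satellite", "full view"]):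
--         tags["damage_type"] = "overview"
--
--     # Material
--     if any(w in ann_lower for w in ["aluminum siding", "aluminum .024", "alumin"]):
--         tags["material"] = "aluminum_siding"
--     elif any(w in ann_lower for w in ["vinyl siding"]):
--         tags["material"] = "vinyl_siding"
--     elif any(w in ann_lower for w in ["laminated", "architectural", "comp shingle"]):
--         tags["material"] = "comp_shingle_laminated"
--     elif any(w in ann_lower for w in ["3-tab", "three tab", "3 tab"]):
--         tags["material"] = "comp_shingle_3tab"
--     elif any(w in ann_lower for w in ["slate"]):
--         tags["material"] = "slate"
--     elif any(w in ann_lower for w in ["copper"]):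
--         tags["material"] = "copper"
--     elif any(w in ann_lower for w in ["gutter", "downspout"]):
--         tags["material"] = "aluminum_gutter"
--     elif any(w in ann_lower for w in ["flashing", "step flash", "counter flash"]):
--         tags["material"] = "metal_flashing"
--     elif any(w in ann_lower for w in ["window wrap", "window trim", "j-channel"]):
--         tags["material"] = "aluminum_trim"
--     elif any(w in ann_lower for w in ["vent", "exhaust", "pipe boot", "pipe collar"]):
--         tags["material"] = "metal_vent"
--
--     # Trade
--     if any(w in ann_lower for w in ["siding", "wall", "elevation", "house wrap"]):
--         tags["trade"] = "siding"
--     elif any(w in ann_lower for w in ["gutter", "downspout"]):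
--         tags["trade"] = "gutters"
--     elif any(w in ann_lower for w in ["window wrap", "window trim"]):
--         tags["trade"] = "window_wraps"
--     elif any(w in ann_lower for w in ["shingle", "roof", "ridge", "valley", "flashing", "vent", "pipe"]):
--         tags["trade"] = "roofing"
--
--     # Elevation
--     if any(w in ann_lower for w in ["front elevation", "front of"]):
--         tags["elevation"] = "front"
--     elif any(w in ann_lower for w in ["rear elevation", "rear of", "back elevation", "back of"]):
--         tags["elevation"] = "rear"
--     elif any(w in ann_lower for w in ["left elevation", "left side"]):
--         tags["elevation"] = "left"
--     elif any(w in ann_lower for w in ["right elevation", "right side"]):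
--         tags["elevation"] = "right"
--     elif any(w in ann_lower for w in ["roof", "slope", "shingle"]):
--         tags["elevation"] = "roof"
--     elif any(w in ann_lower for w in ["close-up", "closeup", "detail", "macro"]):
--         tags["elevation"] = "detail"
--
--     return tags
-- ===== SOURCE B (Python) =====
-- # B: flatten all rules into one keyword-major list and make a SINGLE pass over
-- # it, recording each category's tag with dict.setdefault (first hit per
-- # category wins) -- no per-category if/elif ladders and no break.
--
-- _TABLE = [
--     ("damage_type", [
--         (["chalk", "chalk test", "chalk line"], "chalk_test"),
--         (["hail dent", "hail impact", "hail damage", "indentation"], "hail_dent"),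
--         (["crack", "fracture", "split"], "crack"),
--         (["missing", "absent", "torn off", "blown off"], "missing"),
--         (["granule loss", "granule displacement"], "granule_loss"),
--         (["lifted", "curled", "unsealed"], "lifted_tab"),
--         (["wind crease", "wind damage"], "wind_crease"),
--         (["rust", "corrosion", "oxidation"], "corrosion"),
--         (["overview", "aerial", "satellite", "full view"], "overview"),
--     ]),
--     ("material", [
--         (["aluminum siding", "aluminum .024", "alumin"], "aluminum_siding"),
--         (["vinyl siding"], "vinyl_siding"),
--         (["laminated", "architectural", "comp shingle"], "comp_shingle_laminated"),
--         (["3-tab", "three tab", "3 tab"], "comp_shingle_3tab"),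
--         (["slate"], "slate"),
--         (["copper"], "copper"),
--         (["gutter", "downspout"], "aluminum_gutter"),
--         (["flashing", "step flash", "counter flash"], "metal_flashing"),
--         (["window wrap", "window trim", "j-channel"], "aluminum_trim"),
--         (["vent", "exhaust", "pipe boot", "pipe collar"], "metal_vent"),
--     ]),
--     ("trade", [
--         (["siding", "wall", "elevation", "house wrap"], "siding"),
--         (["gutter", "downspout"], "gutters"),
--         (["window wrap", "window trim"], "window_wraps"),
--         (["shingle", "roof", "ridge", "valley", "flashing", "vent", "pipe"], "roofing"),
--     ]),
--     ("elevation", [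
--         (["front elevation", "front of"], "front"),
--         (["rear elevation", "rear of", "back elevation", "back of"], "rear"),
--         (["left elevation", "left side"], "left"),
--         (["right elevation", "right side"], "right"),
--         (["roof", "slope", "shingle"], "roof"),
--         (["close-up", "closeup", "detail", "macro"], "detail"),
--     ]),
-- ]
--
-- # one flat keyword-major list: (keyword, category, tag), in priority order
-- _FLAT = [(kw, cat, tag)
--          for cat, rules in _TABLE
--          for words, tag in rules
--          for kw in words]
--
--
-- def _infer_photo_tags(annotation: str) -> dict:
--     tags = {}
--     if not annotation:
--         return tags
--     low = annotation.lower()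
--     for kw, cat, tag in _FLAT:
--         if kw in low:
--             tags.setdefault(cat, tag)
--     return tags
-- ===== Notes on version B (the rewrite author's own statement) =====
-- stated objective: alternative
-- what changed: Flattens all rules into one keyword-major (keyword, category, tag) list and classifies in a single pass over that list using dict.setdefault as the first-hit-per-category accumulator, replacing A's four separate if/elif substring ladders.
import Mathlib
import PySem

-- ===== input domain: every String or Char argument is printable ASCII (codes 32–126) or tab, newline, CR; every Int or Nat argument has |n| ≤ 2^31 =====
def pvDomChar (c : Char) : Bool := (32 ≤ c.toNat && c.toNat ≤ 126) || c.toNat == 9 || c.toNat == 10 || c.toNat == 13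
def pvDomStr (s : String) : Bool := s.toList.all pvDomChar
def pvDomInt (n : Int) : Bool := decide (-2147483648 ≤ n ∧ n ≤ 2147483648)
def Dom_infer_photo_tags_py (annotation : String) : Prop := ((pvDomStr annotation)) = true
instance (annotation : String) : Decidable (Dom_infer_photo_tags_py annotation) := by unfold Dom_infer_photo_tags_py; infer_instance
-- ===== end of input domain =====

-- B flattens all rules into one keyword-major (keyword, category, tag) list and classifies in a
-- single pass over it with dict.setdefault, replacing A's four if/elif ladders (objective: alternative).


-- ===== PORT A =====
-- any(w in s for w in ws)
def pvAnyIn (ws : List String) (s : String) : Bool :=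
  ws.any (fun w => PySem.Str.isIn w s)

-- literal port of A's four if/elif ladders
def infer_photo_tags_py (annotation : String) : List (String × String) :=
  let tags : PySem.Dict String String := PySem.Dict.empty
  if annotation == "" then tags.items else
  let ann_lower := PySem.Str.lower annotation
  let tags :=
    if pvAnyIn ["chalk", "chalk test", "chalk line"] ann_lower then tags.insert "damage_type" "chalk_test"
    else if pvAnyIn ["hail dent", "hail impact", "hail damage", "indentation"] ann_lower then tags.insert "damage_type" "hail_dent"
    else if pvAnyIn ["crack", "fracture", "split"] ann_lower then tags.insert "damage_type" "crack"
    else if pvAnyIn ["missing", "absent", "torn off", "blown off"] ann_lower then tags.insert "damage_type" "missing"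
    else if pvAnyIn ["granule loss", "granule displacement"] ann_lower then tags.insert "damage_type" "granule_loss"
    else if pvAnyIn ["lifted", "curled", "unsealed"] ann_lower then tags.insert "damage_type" "lifted_tab"
    else if pvAnyIn ["wind crease", "wind damage"] ann_lower then tags.insert "damage_type" "wind_crease"
    else if pvAnyIn ["rust", "corrosion", "oxidation"] ann_lower then tags.insert "damage_type" "corrosion"
    else if pvAnyIn ["overview", "aerial", "satellite", "full view"] ann_lower then tags.insert "damage_type" "overview"
    else tags
  let tags :=
    if pvAnyIn ["aluminum siding", "aluminum .024", "alumin"] ann_lower then tags.insert "material" "aluminum_siding"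
    else if pvAnyIn ["vinyl siding"] ann_lower then tags.insert "material" "vinyl_siding"
    else if pvAnyIn ["laminated", "architectural", "comp shingle"] ann_lower then tags.insert "material" "comp_shingle_laminated"
    else if pvAnyIn ["3-tab", "three tab", "3 tab"] ann_lower then tags.insert "material" "comp_shingle_3tab"
    else if pvAnyIn ["slate"] ann_lower then tags.insert "material" "slate"
    else if pvAnyIn ["copper"] ann_lower then tags.insert "material" "copper"
    else if pvAnyIn ["gutter", "downspout"] ann_lower then tags.insert "material" "aluminum_gutter"
    else if pvAnyIn ["flashing", "step flash", "counter flash"] ann_lower then tags.insert "material" "metal_flashing"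
    else if pvAnyIn ["window wrap", "window trim", "j-channel"] ann_lower then tags.insert "material" "aluminum_trim"
    else if pvAnyIn ["vent", "exhaust", "pipe boot", "pipe collar"] ann_lower then tags.insert "material" "metal_vent"
    else tags
  let tags :=
    if pvAnyIn ["siding", "wall", "elevation", "house wrap"] ann_lower then tags.insert "trade" "siding"
    else if pvAnyIn ["gutter", "downspout"] ann_lower then tags.insert "trade" "gutters"
    else if pvAnyIn ["window wrap", "window trim"] ann_lower then tags.insert "trade" "window_wraps"
    else if pvAnyIn ["shingle", "roof", "ridge", "valley", "flashing", "vent", "pipe"] ann_lower then tags.insert "trade" "roofing"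
    else tags
  let tags :=
    if pvAnyIn ["front elevation", "front of"] ann_lower then tags.insert "elevation" "front"
    else if pvAnyIn ["rear elevation", "rear of", "back elevation", "back of"] ann_lower then tags.insert "elevation" "rear"
    else if pvAnyIn ["left elevation", "left side"] ann_lower then tags.insert "elevation" "left"
    else if pvAnyIn ["right elevation", "right side"] ann_lower then tags.insert "elevation" "right"
    else if pvAnyIn ["roof", "slope", "shingle"] ann_lower then tags.insert "elevation" "roof"
    else if pvAnyIn ["close-up", "closeup", "detail", "macro"] ann_lower then tags.insert "elevation" "detail"
    else tags
  tags.items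

-- ===== PORT B =====
-- B's rule table (_TABLE in Source B), per category
def pvR1 : List (List String × String) :=
  [ (["chalk", "chalk test", "chalk line"], "chalk_test"),
    (["hail dent", "hail impact", "hail damage", "indentation"], "hail_dent"),
    (["crack", "fracture", "split"], "crack"),
    (["missing", "absent", "torn off", "blown off"], "missing"),
    (["granule loss", "granule displacement"], "granule_loss"),
    (["lifted", "curled", "unsealed"], "lifted_tab"),
    (["wind crease", "wind damage"], "wind_crease"),
    (["rust", "corrosion", "oxidation"], "corrosion"),
    (["overview", "aerial", "satellite", "full view"], "overview") ]
def pvR2 : List (List String × String) :=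
  [ (["aluminum siding", "aluminum .024", "alumin"], "aluminum_siding"),
    (["vinyl siding"], "vinyl_siding"),
    (["laminated", "architectural", "comp shingle"], "comp_shingle_laminated"),
    (["3-tab", "three tab", "3 tab"], "comp_shingle_3tab"),
    (["slate"], "slate"),
    (["copper"], "copper"),
    (["gutter", "downspout"], "aluminum_gutter"),
    (["flashing", "step flash", "counter flash"], "metal_flashing"),
    (["window wrap", "window trim", "j-channel"], "aluminum_trim"),
    (["vent", "exhaust", "pipe boot", "pipe collar"], "metal_vent") ]
def pvR3 : List (List String × String) :=
  [ (["siding", "wall", "elevation", "house wrap"], "siding"),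
    (["gutter", "downspout"], "gutters"),
    (["window wrap", "window trim"], "window_wraps"),
    (["shingle", "roof", "ridge", "valley", "flashing", "vent", "pipe"], "roofing") ]
def pvR4 : List (List String × String) :=
  [ (["front elevation", "front of"], "front"),
    (["rear elevation", "rear of", "back elevation", "back of"], "rear"),
    (["left elevation", "left side"], "left"),
    (["right elevation", "right side"], "right"),
    (["roof", "slope", "shingle"], "roof"),
    (["close-up", "closeup", "detail", "macro"], "detail") ]

def pvTable : List (String × List (List String × String)) :=
  [ ("damage_type", pvR1), ("material", pvR2), ("trade", pvR3), ("elevation", pvR4) ]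

-- one category's share of the flat list
def pvSeg (c : String) (rules : List (List String × String)) : List (String × String × String) :=
  rules.flatMap (fun r => r.1.map (fun w => (w, c, r.2)))

-- _FLAT: flat keyword-major (keyword, category, tag) list
def pvFlat : List (String × String × String) :=
  pvTable.flatMap (fun p => pvSeg p.1 p.2)

-- loop body: if kw in low: tags.setdefault(cat, tag)
def pvStep (low : String) (tags : PySem.Dict String String) (e : String × String × String) :
    PySem.Dict String String :=
  if PySem.Str.isIn e.1 low then tags.setdefault e.2.1 e.2.2 else tags

def infer_photo_tags_py_alt (annotation : String) : List (String × String) :=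
  let tags : PySem.Dict String String := PySem.Dict.empty
  if annotation == "" then tags.items else
  let low := PySem.Str.lower annotation
  (pvFlat.foldl (pvStep low) tags).items

-- ===== PRECONDITION & SPEC =====
def Spec_infer_photo_tags_py (annotation : String) (out : List (String × String)) : Prop := out = infer_photo_tags_py_alt annotation
instance (annotation : String) (out : List (String × String)) : Decidable (Spec_infer_photo_tags_py annotation out) := by unfold Spec_infer_photo_tags_py; infer_instance

-- ===== CLAIM (what is proved, stated in full; the proofs are below) =====
def Claim_equal_infer_photo_tags_py : Prop := ∀ (annotation : String), Dom_infer_photo_tags_py annotation → Spec_infer_photo_tags_py annotation (infer_photo_tags_py annotation)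

-- ===== LEMMAS AND PROOFS =====

-- A's per-category elif ladder, abstracted over the rule list (proof-side characterisation)
def pvLadder (low c : String) (tags : PySem.Dict String String) :
    List (List String × String) → PySem.Dict String String
  | [] => tags
  | (ws, t) :: rest =>
      if pvAnyIn ws low then tags.insert c t else pvLadder low c tags rest

-- folding entries whose keys are already present is a no-op
theorem pv_fold_contains (low : String) (es : List (String × String × String))
    (tags : PySem.Dict String String) (h : ∀ e ∈ es, tags.contains e.2.1 = true) :
    es.foldl (pvStep low) tags = tags := by
  induction es with
  | nil => rfl
  | cons e rest ih =>
      have he := h e (List.mem_cons_self ..)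
      have hstep : pvStep low tags e = tags := by
        unfold pvStep
        rw [PySem.Dict.setdefault_of_contains _ _ he]
        split <;> rfl
      simp only [List.foldl_cons, hstep]
      exact ih (fun e' he' => h e' (List.mem_cons_of_mem _ he'))

-- folding one rule's keywords on a dict without the key = the rule's if
theorem pv_fold_rule (low c t : String) (kws : List String)
    (tags : PySem.Dict String String) (h : tags.contains c = false) :
    (kws.map (fun w => (w, c, t))).foldl (pvStep low) tags =
      if pvAnyIn kws low then tags.insert c t else tags := by
  induction kws generalizing tags with
  | nil => simp [pvAnyIn]
  | cons w ws ih =>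
      simp only [List.map_cons, List.foldl_cons]
      by_cases hw : PySem.Str.isIn w low = true
      · have hstep : pvStep low tags (w, c, t) = tags.insert c t := by
          unfold pvStep
          rw [if_pos hw, PySem.Dict.setdefault_of_not_contains _ _ h]
        rw [hstep, pv_fold_contains]
        · have : pvAnyIn (w :: ws) low = true := by
            simp only [pvAnyIn, List.any_cons, hw, Bool.true_or]
          rw [if_pos this]
        · intro e he
          obtain ⟨w', _, rfl⟩ := List.mem_map.1 he
          exact PySem.Dict.contains_insert_self _ _ _
      · have hstep : pvStep low tags (w, c, t) = tags := by
          unfold pvStep; rw [if_neg hw]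
        rw [hstep, ih tags h]
        have hw' : PySem.Str.isIn w low = false := by simpa using hw
        have : pvAnyIn (w :: ws) low = pvAnyIn ws low := by
          simp only [pvAnyIn, List.any_cons, hw', Bool.false_or]
        rw [this]

-- folding one category's flat segment = A's elif ladder for that category
theorem pv_fold_seg (low c : String) (rules : List (List String × String))
    (tags : PySem.Dict String String) (h : tags.contains c = false) :
    (pvSeg c rules).foldl (pvStep low) tags = pvLadder low c tags rules := by
  induction rules generalizing tags with
  | nil => rfl
  | cons r rest ih =>
      obtain ⟨ws, t⟩ := r
      simp only [pvSeg, List.flatMap_cons, List.foldl_append] at *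
      rw [pv_fold_rule low c t ws tags h]
      by_cases hr : pvAnyIn ws low = true
      · rw [if_pos hr]
        rw [pv_fold_contains]
        · simp [pvLadder, hr]
        · intro e he
          simp only [List.mem_flatMap, List.mem_map] at he
          obtain ⟨r', _, w', _, rfl⟩ := he
          exact PySem.Dict.contains_insert_self _ _ _
      · rw [if_neg hr, ih tags h]
        simp [pvLadder, hr]

-- a ladder for another key leaves contains of c unchanged
theorem pv_ladder_contains_ne (low c c' : String) (h : c ≠ c')
    (tags : PySem.Dict String String) (rules : List (List String × String)) :
    (pvLadder low c' tags rules).contains c = tags.contains c := by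
  induction rules generalizing tags with
  | nil => rfl
  | cons r rest ih =>
      obtain ⟨ws, t⟩ := r
      unfold pvLadder
      split
      · rw [PySem.Dict.contains_insert]
        have : (c == c') = false := by simpa using h
        simp [this]
      · exact ih tags

-- ===== VERDICT (by name: the statement is the Claim_ definition above) =====
theorem infer_photo_tags_py_spec : Claim_equal_infer_photo_tags_py := by
  intro annotation _
  unfold Spec_infer_photo_tags_py infer_photo_tags_py infer_photo_tags_py_alt
  by_cases hempty : (annotation == "") = true
  · simp [hempty]
  · rw [if_neg hempty, if_neg hempty]
    set low := PySem.Str.lower annotation with hlow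
    have hflat : pvFlat = pvSeg "damage_type" pvR1 ++ (pvSeg "material" pvR2 ++
        (pvSeg "trade" pvR3 ++ (pvSeg "elevation" pvR4 ++ []))) := by
      simp [pvFlat, pvTable]
    rw [hflat]
    simp only [List.append_nil, List.foldl_append]
    have h1 : (PySem.Dict.empty : PySem.Dict String String).contains "damage_type" = false :=
      PySem.Dict.contains_empty _
    rw [pv_fold_seg low "damage_type" pvR1 _ h1]
    set t1 := pvLadder low "damage_type" PySem.Dict.empty pvR1 with ht1
    have h2 : t1.contains "material" = false := by
      rw [ht1, pv_ladder_contains_ne low "material" "damage_type" (by decide)]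
      exact PySem.Dict.contains_empty _
    rw [pv_fold_seg low "material" pvR2 _ h2]
    set t2 := pvLadder low "material" t1 pvR2 with ht2
    have h3 : t2.contains "trade" = false := by
      rw [ht2, pv_ladder_contains_ne low "trade" "material" (by decide),
          ht1, pv_ladder_contains_ne low "trade" "damage_type" (by decide)]
      exact PySem.Dict.contains_empty _
    rw [pv_fold_seg low "trade" pvR3 _ h3]
    set t3 := pvLadder low "trade" t2 pvR3 with ht3
    have h4 : t3.contains "elevation" = false := by
      rw [ht3, pv_ladder_contains_ne low "elevation" "trade" (by decide),
          ht2, pv_ladder_contains_ne low "elevation" "material" (by decide),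
          ht1, pv_ladder_contains_ne low "elevation" "damage_type" (by decide)]
      exact PySem.Dict.contains_empty _
    rw [pv_fold_seg low "elevation" pvR4 _ h4]
    simp only [ht1, ht2, ht3, pvLadder, pvR1, pvR2, pvR3, pvR4]
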